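-- pv_equiv track=rewrite | github.com/ShunsukeHayashi/garc-gws-agent-runtime | scripts/garc-ingress-helper.py | infer_gate
-- ===== SOURCE A (Python) =====
-- def infer_gate(task_types: list[str], gate_policy: dict) -> str:
--     """Return the highest-risk gate for the given task types."""
--     gates = gate_policy.get("gates", {})
--     highest = "none"
--     order = ["none", "preview", "approval"]
--     for task in task_types:
--         for gate_name, gate_data in gates.items():
--             if task in gate_data.get("tasks", []):
--                 if order.index(gate_name) > order.index(highest):
--                     highest = gate_name
--     return highest
-- ===== SOURCE B (Python) =====
-- def infer_gate(task_types, gate_policy):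
--     order = ["none", "preview", "approval"]
--     wanted = set(task_types)
--     best = 0
--     for gate_name, gate_data in gate_policy.get("gates", {}).items():
--         if gate_name in order and any(t in wanted for t in gate_data.get("tasks", [])):
--             best = max(best, order.index(gate_name))
--     return order[best]
-- ===== Notes on version B (the rewrite author's own statement) =====
-- stated objective: alternative
-- what changed: Instead of A's task-major nested scan that tracks a running gate NAME and re-derives its rank with order.index on every hit, B makes one gate-major pass keeping a running numeric rank, testing each gate's task list against a precomputed set of the wanted task types, and indexes back into order once at the end.
import Mathlib
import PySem

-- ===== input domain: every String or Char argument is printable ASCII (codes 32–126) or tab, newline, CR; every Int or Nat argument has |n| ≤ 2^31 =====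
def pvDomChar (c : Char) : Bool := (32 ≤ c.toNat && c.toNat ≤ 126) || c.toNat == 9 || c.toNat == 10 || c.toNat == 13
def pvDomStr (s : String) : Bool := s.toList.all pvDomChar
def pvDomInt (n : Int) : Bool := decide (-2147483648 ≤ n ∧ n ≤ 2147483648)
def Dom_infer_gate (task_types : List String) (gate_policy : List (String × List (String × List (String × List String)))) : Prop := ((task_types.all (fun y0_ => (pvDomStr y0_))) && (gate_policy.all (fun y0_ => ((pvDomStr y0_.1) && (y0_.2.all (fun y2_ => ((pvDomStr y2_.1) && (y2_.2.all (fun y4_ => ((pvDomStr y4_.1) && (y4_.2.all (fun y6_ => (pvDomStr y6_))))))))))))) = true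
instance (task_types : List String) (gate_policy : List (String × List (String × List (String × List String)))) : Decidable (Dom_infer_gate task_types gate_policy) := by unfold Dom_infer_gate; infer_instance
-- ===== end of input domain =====

-- B replaces A's task-major nested scan (running gate NAME, order.index on every hit) by one
-- gate-major pass keeping a numeric running rank against a set of the task types (objective: alternative).

-- ===== PORT A =====
def infer_gate (task_types : List String) (gate_policy : List (String × List (String × List (String × List String)))) : String :=
  let gates := (PySem.Dict.ofList gate_policy).getD "gates" []
  let order := ["none", "preview", "approval"]
  task_types.foldl (fun highest task =>
    (PySem.Dict.ofList gates).items.foldl (fun highest p =>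
      if ((PySem.Dict.ofList p.2).getD "tasks" []).contains task then
        -- order.index(...): raises outside Pre_; total '.getD 0' form, exact under Pre_
        if ((PySem.List.index? order p.1).getD 0) > ((PySem.List.index? order highest).getD 0) then
          p.1
        else highest
      else highest) highest) "none"

-- ===== PORT B =====
def infer_gate_alt (task_types : List String) (gate_policy : List (String × List (String × List (String × List String)))) : String :=
  let order := ["none", "preview", "approval"]
  let wanted := PySem.Set.ofList task_types
  let best := (PySem.Dict.ofList ((PySem.Dict.ofList gate_policy).getD "gates" [])).items.foldl
    (fun best p =>
      if order.contains p.1 && ((PySem.Dict.ofList p.2).getD "tasks" []).any (fun t => wanted.contains t) then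
        max best ((PySem.List.index? order p.1).getD 0)
      else best) 0
  PySem.List.pyGetD order (best : Int) ""

-- ===== PRECONDITION & SPEC =====
-- Pre_ excludes exactly the inputs on which A raises ValueError: some gate whose task list
-- contains one of the task types has a name outside ["none", "preview", "approval"].
def Pre_infer_gate (task_types : List String) (gate_policy : List (String × List (String × List (String × List String)))) : Prop :=
  ∀ p ∈ (PySem.Dict.ofList ((PySem.Dict.ofList gate_policy).getD "gates" [])).items,
    (∃ task ∈ task_types, task ∈ (PySem.Dict.ofList p.2).getD "tasks" []) →
    p.1 ∈ ["none", "preview", "approval"]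
instance (task_types : List String) (gate_policy : List (String × List (String × List (String × List String)))) : Decidable (Pre_infer_gate task_types gate_policy) := by unfold Pre_infer_gate; infer_instance

def pvWitness_infer_gate : List String × (List (String × List (String × List (String × List String)))) :=
  (["a"], [("gates", [("preview", [("tasks", ["a"])])])])

def Spec_infer_gate (task_types : List String) (gate_policy : List (String × List (String × List (String × List String)))) (out : String) : Prop := out = infer_gate_alt task_types gate_policy
instance (task_types : List String) (gate_policy : List (String × List (String × List (String × List String)))) (out : String) : Decidable (Spec_infer_gate task_types gate_policy out) := by unfold Spec_infer_gate; infer_instance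

-- ===== CLAIM (what is proved, stated in full; the proofs are below) =====
def Claim_equal_infer_gate : Prop := ∀ (task_types : List String) (gate_policy : List (String × List (String × List (String × List String)))), Dom_infer_gate task_types gate_policy → Pre_infer_gate task_types gate_policy → Spec_infer_gate task_types gate_policy (infer_gate task_types gate_policy)

-- ===== LEMMAS AND PROOFS =====

-- abbreviations for the proofs
def pvOrd : List String := ["none", "preview", "approval"]
def pvIx (s : String) : Nat := (PySem.List.index? pvOrd s).getD 0
def pvTk (p : String × List (String × List String)) : List String :=
  (PySem.Dict.ofList p.2).getD "tasks" []
-- max of pvIx over the gates satisfying q (0 if none)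
def pvMx (q : String × List (String × List String) → Bool) :
    List (String × List (String × List String)) → Nat
  | [] => 0
  | p :: G => if q p then max (pvIx p.1) (pvMx q G) else pvMx q G

lemma pv_ix_le (s : String) : pvIx s ≤ 2 := by
  rcases hh : PySem.List.index? pvOrd s with _ | k
  · simp only [pvIx, hh, Option.getD_none]; omega
  · obtain ⟨hk, -, -⟩ := PySem.List.getElem_of_index?_eq_some hh
    simp only [pvIx, hh, Option.getD_some]
    simpa [pvOrd] using Nat.lt_succ_iff.mp (by simpa [pvOrd] using hk)

lemma pv_mx_le (q : String × List (String × List String) → Bool)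
    (G : List (String × List (String × List String))) : pvMx q G ≤ 2 := by
  induction G with
  | nil => simp [pvMx]
  | cons p G ih =>
    simp only [pvMx]
    split
    · have := pv_ix_le p.1; omega
    · exact ih

lemma pv_mem_ord {s : String} (h : s ∈ pvOrd) :
    s = "none" ∨ s = "preview" ∨ s = "approval" := by simpa [pvOrd] using h

lemma pv_ordAt_ix {s : String} (h : s ∈ pvOrd) : pvOrd.getD (pvIx s) "" = s := by
  rcases pv_mem_ord h with rfl | rfl | rfl <;> decide

lemma pv_ix_ordAt {b : Nat} (hb : b ≤ 2) : pvIx (pvOrd.getD b "") = b := by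
  interval_cases b <;> decide

lemma pv_ordAt_mem {b : Nat} (hb : b ≤ 2) : pvOrd.getD b "" ∈ pvOrd := by
  interval_cases b <;> decide

-- B's fold is the max of pvIx over the selected gates
lemma pv_foldl_mx (q : String × List (String × List String) → Bool)
    (G : List (String × List (String × List String))) (b : Nat) :
    G.foldl (fun b p => if q p then max b (pvIx p.1) else b) b = max b (pvMx q G) := by
  induction G generalizing b with
  | nil => simp [pvMx]
  | cons p G ih =>
    simp only [List.foldl_cons, pvMx]
    by_cases h : q p = true <;> simp only [h, if_true, if_false, Bool.false_eq_true, ite_false] <;>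
      rw [ih] <;> omega

-- pulling the running max out of a fold of maxes
lemma pv_foldl_max {α : Type} (g : α → Nat) (T : List α) (b : Nat) :
    T.foldl (fun b t => max b (g t)) b = max b (T.foldl (fun b t => max b (g t)) 0) := by
  induction T generalizing b with
  | nil => simp
  | cons t T ih =>
    simp only [List.foldl_cons]
    rw [ih (max b (g t)), ih (max 0 (g t))]
    omega

-- lifting a constant out of a fold of maxes when some element triggers it
lemma pv_lift {α : Type} (T : List α) (c : α → Bool) (m : α → Nat) (v : Nat)
    (hex : ∃ t ∈ T, c t = true) :
    T.foldl (fun b t => max b (if c t then max v (m t) else m t)) 0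
      = max v (T.foldl (fun b t => max b (m t)) 0) := by
  induction T with
  | nil => rcases hex with ⟨t, ht, -⟩; cases ht
  | cons t T ih =>
    simp only [List.foldl_cons]
    rw [pv_foldl_max (fun t => if c t then max v (m t) else m t) T,
        pv_foldl_max m T]
    by_cases hc : c t = true
    · simp only [hc, if_true]
      by_cases hT : ∃ u ∈ T, c u = true
      · rw [pv_foldl_max (fun t => if c t then max v (m t) else m t) T 0,
            pv_foldl_max m T 0] at ih
        have := ih hT
        omega
      · have heq : T.foldl (fun b t => max b (if c t then max v (m t) else m t)) 0
            = T.foldl (fun b t => max b (m t)) 0 := by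
          refine PySem.List.foldl_congr_mem T _ _ 0 (fun acc u hu => ?_)
          have : ¬ c u = true := fun h => hT ⟨u, hu, h⟩
          simp [this]
        rw [heq]; omega
    · have hex' : ∃ u ∈ T, c u = true := by
        rcases hex with ⟨u, hu, hcu⟩
        rcases List.mem_cons.mp hu with rfl | hu'
        · exact absurd hcu hc
        · exact ⟨u, hu', hcu⟩
      rw [pv_foldl_max (fun t => if c t then max v (m t) else m t) T 0,
          pv_foldl_max m T 0] at ih
      have := ih hex'
      simp only [hc, Bool.false_eq_true, if_false]
      omega

-- A's inner loop (over the gates, for one task) in closed form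
lemma pv_inner (t : String) (G : List (String × List (String × List String))) (h : String)
    (hmem : h ∈ pvOrd)
    (HP : ∀ p ∈ G, (pvTk p).contains t = true → p.1 ∈ pvOrd) :
    G.foldl (fun h p => if (pvTk p).contains t then
        (if pvIx p.1 > pvIx h then p.1 else h) else h) h
      = pvOrd.getD (max (pvIx h) (pvMx (fun p => (pvTk p).contains t && pvOrd.contains p.1) G)) "" := by
  induction G generalizing h with
  | nil => simp only [List.foldl_nil, pvMx, Nat.max_zero, pv_ordAt_ix hmem]
  | cons p G ih =>
    simp only [List.foldl_cons, pvMx]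
    by_cases hc : (pvTk p).contains t = true
    · have hp : p.1 ∈ pvOrd := HP p (List.mem_cons_self) hc
      have hpc : pvOrd.contains p.1 = true := List.elem_eq_true_of_mem hp
      simp only [hc, if_true, hpc, Bool.and_self]
      have hmem' : (if pvIx p.1 > pvIx h then p.1 else h) ∈ pvOrd := by
        split <;> [exact hp; exact hmem]
      rw [ih _ hmem' (fun p hp' => HP p (List.mem_cons_of_mem _ hp'))]
      have hix : pvIx (if pvIx p.1 > pvIx h then p.1 else h) = max (pvIx h) (pvIx p.1) := by
        split <;> omega
      rw [hix]
      congr 1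
      omega
    · simp only [hc, Bool.false_eq_true, if_false, Bool.false_and]
      exact ih h hmem (fun p hp' => HP p (List.mem_cons_of_mem _ hp'))

-- A's whole computation in closed form
lemma pv_outer (T : List String) (G : List (String × List (String × List String))) (b : Nat)
    (hb : b ≤ 2)
    (HP : ∀ t ∈ T, ∀ p ∈ G, (pvTk p).contains t = true → p.1 ∈ pvOrd) :
    T.foldl (fun h t => G.foldl (fun h p => if (pvTk p).contains t then
        (if pvIx p.1 > pvIx h then p.1 else h) else h) h) (pvOrd.getD b "")
      = pvOrd.getD (T.foldl (fun b t =>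
          max b (pvMx (fun p => (pvTk p).contains t && pvOrd.contains p.1) G)) b) "" := by
  induction T generalizing b with
  | nil => simp
  | cons t T ih =>
    simp only [List.foldl_cons]
    rw [pv_inner t G _ (pv_ordAt_mem hb) (HP t List.mem_cons_self), pv_ix_ordAt hb]
    have hb' : max b (pvMx (fun p => (pvTk p).contains t && pvOrd.contains p.1) G) ≤ 2 := by
      have := pv_mx_le (fun p => (pvTk p).contains t && pvOrd.contains p.1) G
      omega
    exact ih _ hb' (fun u hu => HP u (List.mem_cons_of_mem _ hu))

-- task-major max (A's shape) = gate-major max (B's shape)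
lemma pv_link (T : List String) (G : List (String × List (String × List String))) :
    T.foldl (fun b t =>
        max b (pvMx (fun p => (pvTk p).contains t && pvOrd.contains p.1) G)) 0
      = pvMx (fun p => pvOrd.contains p.1 && (pvTk p).any (fun t => T.contains t)) G := by
  induction G with
  | nil =>
    simp only [pvMx]
    induction T with
    | nil => simp
    | cons t T ihT => simpa using ihT
  | cons p G ih =>
    simp only [pvMx]
    by_cases hq : (pvOrd.contains p.1 && (pvTk p).any (fun t => T.contains t)) = true
    · obtain ⟨hpc, hany⟩ := Bool.and_eq_true_iff.mp hq
      obtain ⟨x, hx, hxT⟩ := List.any_eq_true.mp hany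
      have hex : ∃ u ∈ T, ((pvTk p).contains u && pvOrd.contains p.1) = true := by
        refine ⟨x, List.mem_of_elem_eq_true hxT, ?_⟩
        simp [hx, List.mem_of_elem_eq_true hpc]
      simp only [hq, if_true]
      rw [← ih]
      exact pv_lift T _ _ (pvIx p.1) hex
    · have hall : ∀ u ∈ T, ((pvTk p).contains u && pvOrd.contains p.1) = false := by
        intro u hu
        rcases Bool.eq_false_or_eq_true ((pvTk p).contains u && pvOrd.contains p.1) with h | h
        · exact absurd (Bool.and_eq_true_iff.mpr
            ⟨(Bool.and_eq_true_iff.mp h).2, List.any_eq_true.mpr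
              ⟨u, List.mem_of_elem_eq_true (Bool.and_eq_true_iff.mp h).1,
                List.elem_eq_true_of_mem hu⟩⟩) hq
        · exact h
      simp only [hq, if_false]
      rw [← ih]
      refine PySem.List.foldl_congr_mem T _ _ 0 (fun acc u hu => ?_)
      have hne : ¬ (u ∈ pvTk p ∧ p.1 ∈ pvOrd) := by
        rintro ⟨h1, h2⟩
        have h3 := hall u hu
        simp [h1, h2] at h3
      simp [hne]

-- ===== VERDICT (by name: the statement is the Claim_ definition above) =====
theorem infer_gate_spec : Claim_equal_infer_gate := by
  intro T gp _ hpre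
  unfold Spec_infer_gate
  have hset : ∀ t : String, (PySem.Set.ofList T).contains t = T.contains t := by
    intro t
    by_cases h : t ∈ T <;> simp [h, PySem.Set.mem_ofList]
  have hA : infer_gate T gp
      = T.foldl (fun h t =>
          ((PySem.Dict.ofList ((PySem.Dict.ofList gp).getD "gates" [])).items).foldl
            (fun h p => if (pvTk p).contains t then
              (if pvIx p.1 > pvIx h then p.1 else h) else h) h) (pvOrd.getD 0 "") := rfl
  have hB : infer_gate_alt T gp
      = PySem.List.pyGetD pvOrd
          ((((PySem.Dict.ofList ((PySem.Dict.ofList gp).getD "gates" [])).items).foldl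
            (fun b p =>
              if pvOrd.contains p.1 && (pvTk p).any (fun t => (PySem.Set.ofList T).contains t)
              then max b (pvIx p.1) else b) 0 : Nat) : Int) "" := rfl
  have HP : ∀ t ∈ T, ∀ p ∈ (PySem.Dict.ofList ((PySem.Dict.ofList gp).getD "gates" [])).items,
      (pvTk p).contains t = true → p.1 ∈ pvOrd :=
    fun t ht p hp hc => hpre p hp ⟨t, ht, List.mem_of_elem_eq_true hc⟩
  rw [hA, hB]
  simp only [hset]
  rw [pv_foldl_mx, PySem.List.pyGetD_natCast, Nat.zero_max,
      pv_outer T _ 0 (by omega) HP, pv_link]
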